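-- pv_equiv track=rewrite | github.com/siimveske/AOC | 2016/day7/day_07_internet_protocol_v7.py | supports_ssl
-- ===== SOURCE A (Python) =====
-- def supports_ssl(ip_address: str) -> bool:
--     segments = ip_address.replace("[", " ").replace("]", " ").split()
--     outside_brackets = segments[::2]
--     inside_brackets = segments[1::2]
--
--     for outside in outside_brackets:
--         for i in range(len(outside) - 2):
--             a, b, c = outside[i : i + 3]
--             if a == b or a != c:
--                 continue
--             bab = b + a + b
--             for inside in inside_brackets:
--                 if bab in inside:
--                     return True
--     return False
-- ===== SOURCE B (Python) =====
-- def supports_ssl(ip_address: str) -> bool: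
--     segments = ip_address.replace("[", " ").replace("]", " ").split()
--     abas = {(s[i], s[i + 1])
--             for s in segments[::2]
--             for i in range(len(s) - 2)
--             if s[i] == s[i + 2] and s[i] != s[i + 1]}
--     babs = {(s[i], s[i + 1])
--             for s in segments[1::2]
--             for i in range(len(s) - 2)
--             if s[i] == s[i + 2]}
--     return any((b, a) in babs for (a, b) in abas)
-- ===== Notes on version B (the rewrite author's own statement) =====
-- stated objective: alternative
-- what changed: A's nested scan (for each outside ABA window, substring-search every inside segment) is replaced by building two pattern sets in one pass each — ABA pairs from the outside segments and window pairs from the inside segments — followed by a single flat mirrored-membership pass.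
import Mathlib
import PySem

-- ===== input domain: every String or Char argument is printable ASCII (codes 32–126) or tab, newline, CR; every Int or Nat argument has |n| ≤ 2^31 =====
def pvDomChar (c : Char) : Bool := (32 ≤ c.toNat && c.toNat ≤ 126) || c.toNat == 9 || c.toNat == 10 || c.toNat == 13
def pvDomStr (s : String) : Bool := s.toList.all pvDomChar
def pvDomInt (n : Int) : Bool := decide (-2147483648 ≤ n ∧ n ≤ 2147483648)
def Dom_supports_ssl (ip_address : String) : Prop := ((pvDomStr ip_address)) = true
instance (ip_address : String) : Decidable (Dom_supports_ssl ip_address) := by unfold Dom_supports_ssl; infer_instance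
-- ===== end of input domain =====

-- B replaces A's nested scan-and-substring-search with two pattern tables (sets of ABA
-- pairs outside, BAB pairs inside) and one flat mirrored-membership pass (alternative).

-- ===== PORT A =====
-- the three nested loops of A, with early 'return True' as List.any
def aScan (inside_brackets : List String) (outside_brackets : List String) : Bool :=
  outside_brackets.any fun outside =>
    (PySem.List.pyRange 0 ((outside.toList.length : Int) - 2) 1).any fun i =>
      match PySem.List.slice outside.toList (some i) (some (i + 3)) with
      | [a, b, c] =>
        if a == b || !(a == c) then false
        else inside_brackets.any fun inside => PySem.Chars.isIn [b, a, b] inside.toList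
      | _ => false

def supports_ssl (ip_address : String) : Bool :=
  let segments := PySem.Str.split₀ (PySem.Str.replace (PySem.Str.replace ip_address "[" " ") "]" " ")
  let outside_brackets := (PySem.List.slice? segments none none 2).getD []
  let inside_brackets := (PySem.List.slice? segments (some 1) none 2).getD []
  aScan inside_brackets outside_brackets

-- ===== PORT B =====
-- set comprehension over segments[::2]: all (a,b) with window a b a, a ≠ b
-- (indices i, i+1, i+2 are in range for i < len-2, so List.getD is Python-exact here)
def abaPairs (segs : List String) : List (Char × Char) :=
  segs.flatMap fun s =>
    ((List.range (s.toList.length - 2)).filter fun i =>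
        s.toList.getD i ' ' == s.toList.getD (i + 2) ' '
          && !(s.toList.getD i ' ' == s.toList.getD (i + 1) ' ')).map
      fun i => (s.toList.getD i ' ', s.toList.getD (i + 1) ' ')

-- set comprehension over segments[1::2]: all (x,y) with window x y x
def babPairs (segs : List String) : List (Char × Char) :=
  segs.flatMap fun s =>
    ((List.range (s.toList.length - 2)).filter fun i =>
        s.toList.getD i ' ' == s.toList.getD (i + 2) ' ').map
      fun i => (s.toList.getD i ' ', s.toList.getD (i + 1) ' ')

-- the flat existence pass: any((b, a) in babs for (a, b) in abas)
def altScan (inside_brackets : List String) (outside_brackets : List String) : Bool :=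
  let abas := PySem.Set.ofList (abaPairs outside_brackets)
  let babs := PySem.Set.ofList (babPairs inside_brackets)
  abas.any fun p => PySem.Set.contains babs (p.2, p.1)

def supports_ssl_alt (ip_address : String) : Bool :=
  let segments := PySem.Str.split₀ (PySem.Str.replace (PySem.Str.replace ip_address "[" " ") "]" " ")
  let outside_brackets := (PySem.List.slice? segments none none 2).getD []
  let inside_brackets := (PySem.List.slice? segments (some 1) none 2).getD []
  altScan inside_brackets outside_brackets

-- ===== PRECONDITION & SPEC =====
def Spec_supports_ssl (ip_address : String) (out : Bool) : Prop := out = supports_ssl_alt ip_address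
instance (ip_address : String) (out : Bool) : Decidable (Spec_supports_ssl ip_address out) := by unfold Spec_supports_ssl; infer_instance

-- ===== CLAIM (what is proved, stated in full; the proofs are below) =====
def Claim_equal_supports_ssl : Prop := ∀ (ip_address : String), Dom_supports_ssl ip_address → Spec_supports_ssl ip_address (supports_ssl ip_address)

-- ===== LEMMAS AND PROOFS =====

/-- the window [x,y,z] occurs in cs at position j -/
def Occ (cs : List Char) (x y z : Char) : Prop :=
  ∃ j : Nat, cs[j]? = some x ∧ cs[j + 1]? = some y ∧ cs[j + 2]? = some z

theorem take3_eq_iff (l : List Char) (x y z : Char) :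
    l.take 3 = [x, y, z] ↔ l[0]? = some x ∧ l[1]? = some y ∧ l[2]? = some z := by
  match l with
  | [] => simp
  | [a] => simp
  | [a, b] => simp
  | a :: b :: c :: t => simp [List.take]

theorem occ_iff_take (cs : List Char) (x y z : Char) :
    Occ cs x y z ↔ ∃ j : Nat, (cs.drop j).take 3 = [x, y, z] := by
  unfold Occ
  refine exists_congr fun j => ?_
  rw [take3_eq_iff]
  simp [List.getElem?_drop]

theorem isIn_three (x y z : Char) (t : List Char) :
    PySem.Chars.isIn [x, y, z] t = true ↔ Occ t x y z := by
  rw [← PySem.Chars.exists_prefix_drop_iff_isIn, occ_iff_take]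
  refine exists_congr fun j => ?_
  rw [List.prefix_iff_eq_take]
  simp [eq_comm]

theorem occ_bound {cs : List Char} {z : Char} {j : Nat}
    (h : cs[j + 2]? = some z) : j + 2 < cs.length := by
  have := List.getElem?_eq_some_iff.mp h
  exact this.1

theorem aScan_iff (ins outs : List String) :
    aScan ins outs = true ↔
      ∃ x y, x ≠ y ∧ (∃ s ∈ outs, Occ s.toList x y x) ∧ ∃ t ∈ ins, Occ t.toList y x y := by
  unfold aScan
  simp only [List.any_eq_true]
  constructor
  · rintro ⟨s, hs, i, hi, hmatch⟩
    rw [PySem.List.mem_pyRange_iff_of_pos (by norm_num)] at hi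
    obtain ⟨hi0, hilt, -⟩ := hi
    obtain ⟨j, rfl⟩ : ∃ j : Nat, i = (j : Int) := ⟨i.toNat, (Int.toNat_of_nonneg hi0).symm⟩
    have hslice : PySem.List.slice s.toList (some (j : Int)) (some ((j : Int) + 3)) =
        (s.toList.drop j).take 3 := by
      have := PySem.List.slice_natCast_add s.toList j 3
      push_cast at this ⊢
      exact this
    rw [hslice] at hmatch
    rcases hw : (s.toList.drop j).take 3 with _ | ⟨a, _ | ⟨b, _ | ⟨c, _ | _⟩⟩⟩ <;>
      rw [hw] at hmatch <;> simp at hmatch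
    obtain ⟨⟨hab, hac⟩, t, ht, hin⟩ := hmatch
    subst hac
    refine ⟨a, b, hab, ⟨s, hs, ?_⟩, ⟨t, ht, ?_⟩⟩
    · exact (occ_iff_take _ _ _ _).mpr ⟨j, hw⟩
    · exact (isIn_three _ _ _ _).mp hin
  · rintro ⟨x, y, hxy, ⟨s, hs, hocc⟩, t, ht, htocc⟩
    obtain ⟨j, hw⟩ := (occ_iff_take _ _ _ _).mp hocc
    refine ⟨s, hs, (j : Int), ?_, ?_⟩
    · rw [PySem.List.mem_pyRange_iff_of_pos (by norm_num)]
      have hlen : j + 3 ≤ s.length := by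
        have := congrArg List.length hw
        simp [List.length_take, List.length_drop] at this
        omega
      refine ⟨by positivity, by rw [String.length_toList]; omega, by simp⟩
    · have hslice : PySem.List.slice s.toList (some (j : Int)) (some ((j : Int) + 3)) =
          (s.toList.drop j).take 3 := by
        have := PySem.List.slice_natCast_add s.toList j 3
        push_cast at this ⊢
        exact this
      rw [hslice, hw]
      simp [hxy]
      exact ⟨t, ht, (isIn_three y x y t.toList).mpr htocc⟩

theorem getD_some {cs : List Char} {k : Nat} {x : Char} (h : k < cs.length) :
    cs.getD k ' ' = x ↔ cs[k]? = some x := by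
  rw [List.getD_eq_getElem?_getD, List.getElem?_eq_getElem h]
  simp

theorem mem_abaPairs (outs : List String) (x y : Char) :
    (x, y) ∈ abaPairs outs ↔ x ≠ y ∧ ∃ s ∈ outs, Occ s.toList x y x := by
  unfold abaPairs
  simp only [List.mem_flatMap, List.mem_map, List.mem_filter, List.mem_range]
  constructor
  · rintro ⟨s, hs, i, ⟨⟨hi, hcond⟩, hpair⟩⟩
    rw [Bool.and_eq_true, Bool.not_eq_eq_eq_not, Bool.not_true, beq_eq_false_iff_ne] at hcond
    have h2 : i + 2 < s.toList.length := by omega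
    obtain ⟨hx, hy⟩ : s.toList.getD i ' ' = x ∧ s.toList.getD (i + 1) ' ' = y := by
      exact ⟨congrArg Prod.fst hpair, congrArg Prod.snd hpair⟩
    have hz : s.toList.getD (i + 2) ' ' = x := by
      have := beq_iff_eq.mp hcond.1
      rw [← this, hx]
    refine ⟨?_, s, hs, i, ?_, ?_, ?_⟩
    · rw [← hx, ← hy]; exact hcond.2
    · exact (getD_some (by omega)).mp hx
    · exact (getD_some (by omega)).mp hy
    · exact (getD_some h2).mp hz
  · rintro ⟨hxy, s, hs, j, h0, h1, h2⟩
    have hlen : j + 2 < s.toList.length := occ_bound h2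
    refine ⟨s, hs, j, ⟨⟨by omega, ?_⟩, ?_⟩⟩
    · rw [Bool.and_eq_true, Bool.not_eq_eq_eq_not, Bool.not_true, beq_eq_false_iff_ne]
      rw [(getD_some (by omega) : _ ↔ _ = some x).mpr h0]
      constructor
      · rw [beq_iff_eq, (getD_some (by omega)).mpr h2]
      · intro hc
        rw [(getD_some (by omega)).mpr h1] at hc
        exact hxy hc
    · rw [(getD_some (by omega)).mpr h0, (getD_some (by omega)).mpr h1]

theorem mem_babPairs (ins : List String) (x y : Char) :
    (x, y) ∈ babPairs ins ↔ ∃ s ∈ ins, Occ s.toList x y x := by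
  unfold babPairs
  simp only [List.mem_flatMap, List.mem_map, List.mem_filter, List.mem_range]
  constructor
  · rintro ⟨s, hs, i, ⟨⟨hi, hcond⟩, hpair⟩⟩
    have h2 : i + 2 < s.toList.length := by omega
    obtain ⟨hx, hy⟩ : s.toList.getD i ' ' = x ∧ s.toList.getD (i + 1) ' ' = y := by
      exact ⟨congrArg Prod.fst hpair, congrArg Prod.snd hpair⟩
    have hz : s.toList.getD (i + 2) ' ' = x := by
      have := beq_iff_eq.mp hcond
      rw [← this, hx]
    exact ⟨s, hs, i, (getD_some (by omega)).mp hx, (getD_some (by omega)).mp hy,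
      (getD_some h2).mp hz⟩
  · rintro ⟨s, hs, j, h0, h1, h2⟩
    have hlen : j + 2 < s.toList.length := occ_bound h2
    refine ⟨s, hs, j, ⟨⟨by omega, ?_⟩, ?_⟩⟩
    · rw [beq_iff_eq, (getD_some (by omega)).mpr h0, (getD_some (by omega)).mpr h2]
    · rw [(getD_some (by omega)).mpr h0, (getD_some (by omega)).mpr h1]

theorem altScan_iff (ins outs : List String) :
    altScan ins outs = true ↔
      ∃ x y, x ≠ y ∧ (∃ s ∈ outs, Occ s.toList x y x) ∧ ∃ t ∈ ins, Occ t.toList y x y := by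
  unfold altScan
  simp only [List.any_eq_true]
  constructor
  · rintro ⟨⟨x, y⟩, hmem, hcont⟩
    rw [PySem.Set.mem_ofList] at hmem
    rw [PySem.Set.contains_iff, PySem.Set.mem_ofList] at hcont
    obtain ⟨hxy, hout⟩ := (mem_abaPairs outs x y).mp hmem
    exact ⟨x, y, hxy, hout, (mem_babPairs ins y x).mp hcont⟩
  · rintro ⟨x, y, hxy, hout, hin⟩
    refine ⟨(x, y), ?_, ?_⟩
    · rw [PySem.Set.mem_ofList]
      exact (mem_abaPairs outs x y).mpr ⟨hxy, hout⟩
    · rw [PySem.Set.contains_iff, PySem.Set.mem_ofList]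
      exact (mem_babPairs ins y x).mpr hin

theorem scan_eq (ins outs : List String) : aScan ins outs = altScan ins outs := by
  rw [Bool.eq_iff_iff, aScan_iff, altScan_iff]

-- ===== VERDICT (by name: the statement is the Claim_ definition above) =====
theorem supports_ssl_spec : Claim_equal_supports_ssl := by
  intro ip _
  unfold Spec_supports_ssl supports_ssl supports_ssl_alt
  exact scan_eq _ _
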